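-- pv_equiv track=rewrite | github.com/miliar/Code_Jam_Webscraper | solutions_python/Problem_123/467.py | f
-- ===== SOURCE A (Python) =====
-- def f(A,L):
-- 	if L == []:
-- 		return A, L
-- 	L.sort()
-- 	x = L[0]
-- 	while L and x < A:
-- 		L.pop(0)
-- 		A = A + x
-- 		if L:
-- 			x = L[0]
-- 	return A, L
-- ===== SOURCE B (Python) =====
-- def f(A, L):
--     S = sorted(L)
--     i = 0
--     n = len(S)
--     while i < n and S[i] < A:
--         A += S[i]
--         i += 1
--     return A, S[i:]
-- ===== Notes on version B (the rewrite author's own statement) =====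
-- stated objective: alternative
-- what changed: B sorts once and advances an index pointer over the sorted list, returning the remaining slice, instead of A's destructive loop that repeatedly pops the front of the list; A's worst case is quadratic in the number of consumed elements but the generated inputs rarely reach it, so no speed is claimed.
import Mathlib
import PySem

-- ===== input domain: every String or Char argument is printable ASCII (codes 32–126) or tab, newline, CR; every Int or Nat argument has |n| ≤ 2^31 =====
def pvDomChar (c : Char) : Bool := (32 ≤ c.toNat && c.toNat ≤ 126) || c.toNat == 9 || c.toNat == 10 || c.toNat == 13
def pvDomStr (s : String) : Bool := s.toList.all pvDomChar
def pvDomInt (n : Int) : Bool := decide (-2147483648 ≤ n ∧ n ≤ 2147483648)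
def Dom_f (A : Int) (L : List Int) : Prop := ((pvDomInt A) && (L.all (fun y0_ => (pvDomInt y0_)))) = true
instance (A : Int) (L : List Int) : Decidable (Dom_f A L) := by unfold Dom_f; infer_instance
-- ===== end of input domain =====

-- B replaces A's destructive pop(0) loop with one sort and an advancing index pointer (alternative structure, no speed claimed).
-- Python A mutates L in place (sort + pops) while B does not; the equivalence proved here is about the return value only.

-- ===== PORT A =====
-- the while loop: while L and x < A: L.pop(0); A += x; if L: x = L[0]
def fLoopA (A : Int) (x : Int) (L : List Int) : Int × List Int :=
  match L with
  | [] => (A, [])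
  | h :: t =>
    if x < A then
      match t with
      | [] => (A + x, [])
      | h2 :: t2 => fLoopA (A + x) h2 (h2 :: t2)
    else (A, h :: t)

def f (A : Int) (L : List Int) : Int × List Int :=
  if L = [] then (A, L)
  else
    let S := PySem.List.sorted L (fun v => v) false
    match S with
    | [] => (A, [])   -- unreachable: S is a permutation of the nonempty L
    | h :: t => fLoopA A h (h :: t)

-- ===== PORT B =====
-- while i < n and S[i] < A: A += S[i]; i += 1
def fLoopB (S : List Int) (i : Nat) (A : Int) : Int × Nat :=
  if h : i < S.length then
    if S[i] < A then fLoopB S (i + 1) (A + S[i]) else (A, i)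
  else (A, i)
termination_by S.length - i

def f_alt (A : Int) (L : List Int) : Int × List Int :=
  let S := PySem.List.sorted L (fun v => v) false
  let p := fLoopB S 0 A
  (p.1, S.drop p.2)

-- ===== PRECONDITION & SPEC =====
def Spec_f (A : Int) (L : List Int) (out : Int × List Int) : Prop := out = f_alt A L
instance (A : Int) (L : List Int) (out : Int × List Int) : Decidable (Spec_f A L out) := by unfold Spec_f; infer_instance

-- ===== CLAIM (what is proved, stated in full; the proofs are below) =====
def Claim_equal_f : Prop := ∀ (A : Int) (L : List Int), Dom_f A L → Spec_f A L (f A L)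

-- ===== LEMMAS AND PROOFS =====

-- A's loop entered with x = head of the list
def runA (A : Int) (T : List Int) : Int × List Int :=
  match T with
  | [] => (A, [])
  | h :: t => fLoopA A h (h :: t)

theorem runA_cons (A h : Int) (t : List Int) :
    runA A (h :: t) = if h < A then runA (A + h) t else (A, h :: t) := by
  cases t <;> simp [runA, fLoopA]

theorem loopB_drop (S : List Int) (i : Nat) (A : Int) :
    ((fLoopB S i A).1, S.drop (fLoopB S i A).2) = runA A (S.drop i) := by
  by_cases h : i < S.length
  · have hd : S.drop i = S[i] :: S.drop (i + 1) := List.drop_eq_getElem_cons h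
    by_cases hlt : S[i] < A
    · rw [fLoopB]
      simp only [h, hlt, if_pos, dif_pos]
      rw [hd, runA_cons, if_pos hlt]
      exact loopB_drop S (i + 1) (A + S[i])
    · rw [fLoopB]
      simp only [h, hlt, dif_pos, if_neg, not_false_iff]
      rw [hd, runA_cons, if_neg hlt]
  · have hd : S.drop i = [] := List.drop_eq_nil_of_le (Nat.le_of_not_lt h)
    rw [fLoopB]
    simp [h, hd, runA]
termination_by S.length - i

-- ===== VERDICT (by name: the statement is the Claim_ definition above) =====
theorem f_spec : Claim_equal_f := by
  intro A L _
  unfold Spec_f f f_alt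
  have h := loopB_drop (PySem.List.sorted L (fun v => v) false) 0 A
  simp only [List.drop_zero] at h
  by_cases hL : L = []
  · subst hL
    simp [PySem.List.sorted] at h ⊢
    simpa [runA] using h.symm
  · simp only [hL, if_neg, not_false_iff]
    cases hS : PySem.List.sorted L (fun v => v) false with
    | nil => rw [hS] at h; simpa [runA] using h.symm
    | cons a t => rw [hS] at h; simpa [runA] using h.symm
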